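-- pv_equiv track=rewrite | github.com/angelalrae/CPSC310-StudentsPerformance | decision_trees_v3.py | pass_fail_all_test
-- ===== SOURCE A (Python) =====
-- def pass_fail_all_test(table, predict_col, header):
--     newtab = []
--     for student in table:
--         newrow = []
--         for i, h in enumerate(header):
--             if i != predict_col and 'score' not in h:
--                 newrow.append(student[i])
--         newtab.append(newrow + [student[predict_col]])
--     return newtab
-- ===== SOURCE B (Python) =====
-- def pass_fail_all_test(table, predict_col, header):
--     # column-major: extract each kept column from the table, then transpose back to rows
--     cols = [[row[i] for row in table]
--             for i, h in enumerate(header)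
--             if i != predict_col and 'score' not in h]
--     cols.append([row[predict_col] for row in table])
--     return [list(r) for r in zip(*cols)]
-- ===== Notes on version B (the rewrite author's own statement) =====
-- stated objective: alternative
-- what changed: B builds the result column-major: it extracts each kept column (and the predict column) as whole column vectors from the table, then transposes the list of columns back into rows with zip, instead of A's row-major nested loop that tests the header predicate on every cell of every row.
import Mathlib
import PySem

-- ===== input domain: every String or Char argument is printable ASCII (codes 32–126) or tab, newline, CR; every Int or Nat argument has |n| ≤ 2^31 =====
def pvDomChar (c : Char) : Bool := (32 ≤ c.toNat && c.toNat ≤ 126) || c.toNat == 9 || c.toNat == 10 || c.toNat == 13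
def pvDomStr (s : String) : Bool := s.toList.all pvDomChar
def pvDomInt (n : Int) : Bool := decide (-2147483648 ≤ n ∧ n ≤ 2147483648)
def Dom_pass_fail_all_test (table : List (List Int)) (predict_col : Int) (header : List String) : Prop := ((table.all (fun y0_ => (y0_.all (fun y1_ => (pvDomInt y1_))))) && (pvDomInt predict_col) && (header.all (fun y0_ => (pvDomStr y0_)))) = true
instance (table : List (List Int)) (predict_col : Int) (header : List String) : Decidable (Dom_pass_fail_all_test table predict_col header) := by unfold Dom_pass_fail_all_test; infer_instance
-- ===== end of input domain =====

-- B builds the result column-major (extract each kept column, then transpose with zip)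
-- instead of A's row-major nested loop testing the header predicate per cell (objective: alternative).

-- ===== PORT A =====
-- transliteration of A's nested accumulate loops; pyGetD is exact under Pre_ (in-range indices)
def pass_fail_all_test (table : List (List Int)) (predict_col : Int) (header : List String) : List (List Int) :=
  table.foldl (fun newtab student =>
    let newrow := (PySem.List.enumerate header).foldl (fun newrow ih =>
      if (ih.1 != predict_col) && !(PySem.Str.isIn "score" ih.2) then
        newrow ++ [PySem.List.pyGetD student ih.1 0]
      else newrow) []
    newtab ++ [newrow ++ [PySem.List.pyGetD student predict_col 0]]) []

-- ===== PORT B =====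
-- zip(*cols): rows up to the shortest column, row j = j-th element of every column
-- (faithful to Python's zip truncation semantics)
def pyZipStar (cols : List (List Int)) : List (List Int) :=
  let n : Nat := match cols with
    | [] => 0
    | c :: cs => cs.foldl (fun m d => min m d.length) c.length
  (List.range n).map (fun j => cols.map (fun c => c.getD j 0))

-- transliteration of Source B: kept columns + predict column, then transpose via zip
def pass_fail_all_test_alt (table : List (List Int)) (predict_col : Int) (header : List String) : List (List Int) :=
  let cols := ((PySem.List.enumerate header).filter
      (fun ih => (ih.1 != predict_col) && !(PySem.Str.isIn "score" ih.2))).map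
      (fun ih => table.map (fun row => PySem.List.pyGetD row ih.1 0))
  let cols := cols ++ [table.map (fun row => PySem.List.pyGetD row predict_col 0)]
  pyZipStar cols

-- ===== PRECONDITION & SPEC =====
-- exactly the inputs where Python A raises no IndexError: every kept header index and
-- predict_col must be a valid (Python, possibly negative) index into each row
def Pre_pass_fail_all_test (table : List (List Int)) (predict_col : Int) (header : List String) : Prop :=
  ∀ s ∈ table,
    (∀ ih ∈ PySem.List.enumerate header,
       (ih.1 ≠ predict_col ∧ PySem.Str.isIn "score" ih.2 = false) → PySem.Raise.InRange s.length ih.1) ∧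
    PySem.Raise.InRange s.length predict_col
instance (table : List (List Int)) (predict_col : Int) (header : List String) : Decidable (Pre_pass_fail_all_test table predict_col header) := by unfold Pre_pass_fail_all_test; infer_instance

def pvWitness_pass_fail_all_test : List (List Int) × Int × List String :=
  ([[1, 2, 3], [4, 5, 6]], 2, ["name", "score x", "grade"])

def Spec_pass_fail_all_test (table : List (List Int)) (predict_col : Int) (header : List String) (out : List (List Int)) : Prop := out = pass_fail_all_test_alt table predict_col header
instance (table : List (List Int)) (predict_col : Int) (header : List String) (out : List (List Int)) : Decidable (Spec_pass_fail_all_test table predict_col header out) := by unfold Spec_pass_fail_all_test; infer_instance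

-- ===== CLAIM (what is proved, stated in full; the proofs are below) =====
def Claim_equal_pass_fail_all_test : Prop := ∀ (table : List (List Int)) (predict_col : Int) (header : List String), Dom_pass_fail_all_test table predict_col header → Pre_pass_fail_all_test table predict_col header → Spec_pass_fail_all_test table predict_col header (pass_fail_all_test table predict_col header)

-- ===== LEMMAS AND PROOFS =====

-- running min of column lengths that are all L, starting from L, is L
lemma foldl_min_const : ∀ (ds : List (List Int)) (L : Nat), (∀ d ∈ ds, d.length = L) →
    ds.foldl (fun m d => min m d.length) L = L
  | [], _, _ => rfl
  | d :: ds, L, h => by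
      have hd : d.length = L := h d (by simp)
      simp only [List.foldl_cons, hd, min_self]
      exact foldl_min_const ds L (fun x hx => h x (by simp [hx]))

-- zip(*cols) on columns of one uniform length L is the L-row transpose
lemma pyZipStar_uniform (cols : List (List Int)) (L : Nat)
    (hne : cols ≠ []) (h : ∀ c ∈ cols, c.length = L) :
    pyZipStar cols = (List.range L).map (fun j => cols.map (fun c => c.getD j 0)) := by
  unfold pyZipStar
  match cols, hne with
  | c :: cs, _ =>
    have hc : c.length = L := h c (by simp)
    have hmin : cs.foldl (fun m d => min m d.length) L = L :=
      foldl_min_const cs L (fun d hd => h d (by simp [hd]))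
    simp [hc, hmin]

theorem pass_fail_all_test_spec : Claim_equal_pass_fail_all_test := by
  intro table predict_col header _ _
  unfold Spec_pass_fail_all_test
  -- A in row-major map form
  have hA : pass_fail_all_test table predict_col header =
      table.map (fun s =>
        ((PySem.List.enumerate header).filter
            (fun ih => (ih.1 != predict_col) && !(PySem.Str.isIn "score" ih.2))).map
          (fun ih => PySem.List.pyGetD s ih.1 0) ++
        [PySem.List.pyGetD s predict_col 0]) := by
    unfold pass_fail_all_test
    rw [PySem.List.foldl_append_singleton_eq_map]
    simp only [PySem.List.foldl_append_if, List.nil_append]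
  rw [hA]
  unfold pass_fail_all_test_alt
  -- B's columns all have length table.length
  rw [pyZipStar_uniform _ table.length (by simp)
      (by intro c hc
          rcases List.mem_append.1 hc with h | h
          · rcases List.mem_map.1 h with ⟨ih, _, rfl⟩; simp
          · simp at h; simp [h])]
  apply List.ext_getElem
  · simp
  · intro j hj hj'
    have hjlen : j < table.length := by simpa using hj
    have hsome : table[j]? = some (table[j]) := List.getElem?_eq_getElem hjlen
    simp [List.map_append, List.map_map, Function.comp, hsome]
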